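-- pv_equiv track=rewrite | github.com/sarishtshreshth0/plag_extract | Project_CodeNet_Python800/p03775/s266591857.py | check
-- ===== SOURCE A (Python) =====
-- def check(n):
--     min_len = 1 << 60
--     for i in range(1, int(n**.5 + 1)):
--         if n % i == 0:
--             a= i
--             b= n//i
--             min_len = min(min_len, max(len(str(a)), len(str(b))))
--     return min_len
-- ===== SOURCE B (Python) =====
-- def check(n):
--     upper = int(n**.5 + 1)
--     for i in range(upper - 1, 0, -1):
--         if n % i == 0:
--             return max(len(str(i)), len(str(n // i)))
--     return 1 << 60
-- ===== Notes on version B (the rewrite author's own statement) =====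
-- stated objective: alternative
-- what changed: Instead of A's forward loop that accumulates the minimum over ALL divisors i <= sqrt(n), B scans i downward from isqrt(n) and returns at the first divisor found, using the fact that the largest divisor <= sqrt(n) has the cofactor with the fewest digits (so its max digit-length is the minimum).
-- outside the precondition, e.g. on check(-4): A raises TypeError, B raises TypeError
import Mathlib
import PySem

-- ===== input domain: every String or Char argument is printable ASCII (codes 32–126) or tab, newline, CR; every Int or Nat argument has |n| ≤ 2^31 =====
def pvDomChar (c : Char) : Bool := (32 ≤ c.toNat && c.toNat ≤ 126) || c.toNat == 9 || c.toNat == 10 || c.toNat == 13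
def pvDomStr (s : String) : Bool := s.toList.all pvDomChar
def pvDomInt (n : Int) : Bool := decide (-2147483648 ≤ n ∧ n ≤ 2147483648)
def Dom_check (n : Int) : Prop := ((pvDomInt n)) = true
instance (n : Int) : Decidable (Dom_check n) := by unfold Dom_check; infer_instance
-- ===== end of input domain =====

-- B replaces A's forward accumulate-min over all divisors i ≤ √n by a backward scan that
-- returns at the FIRST (= largest) divisor ≤ √n, whose cofactor has the fewest digits
-- (objective: alternative decomposition — early exit instead of a full accumulating pass).


-- ===== PORT A =====
-- int(n**.5 + 1): no floats in the port; for 0 ≤ n ≤ 2^31 the correctly rounded double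
-- sqrt never crosses an integer (the distance from sqrt(n) to the nearest other integer
-- is ≥ 1/(2·46341) ≫ one ulp, and perfect squares are exact doubles), so int(n**.5 + 1)
-- = isqrt(n) + 1 exactly on the domain; ported as Nat.sqrt n.toNat + 1 (Pre_check
-- restricts to 0 ≤ n, where Python does not raise).
def pyUpper (n : Int) : Int := (Nat.sqrt n.toNat : Int) + 1

-- len(str(m))
def pyStrLen (m : Int) : Int := PySem.Str.len (PySem.Int.toStr m)

def check (n : Int) : Int :=
  (PySem.List.pyRange 1 (pyUpper n) 1).foldl
    (fun min_len i =>
      if PySem.Int.mod n i = 0 then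
        min min_len (max (pyStrLen i) (pyStrLen (PySem.Int.floordiv n i)))
      else min_len)
    (1 <<< 60)

-- ===== PORT B =====
-- Source B's loop 'for i in range(upper - 1, 0, -1): if n % i == 0: return …' as a downward
-- structural recursion on i (i = 0 ⇒ loop exhausted ⇒ return 1 << 60).
def checkAltLoop (n : Int) : Nat → Int
  | 0 => 1 <<< 60
  | (k+1) =>
      if PySem.Int.mod n ((k:Int)+1) = 0 then
        max (pyStrLen ((k:Int)+1)) (pyStrLen (PySem.Int.floordiv n ((k:Int)+1)))
      else checkAltLoop n k

def check_alt (n : Int) : Int :=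
  -- upper = int(n**.5 + 1), the identical bound as in A (see comment on pyUpper);
  -- the scan starts at upper - 1 = isqrt(n)
  checkAltLoop n (Nat.sqrt n.toNat)

-- ===== PRECONDITION & SPEC =====
-- Pre_check excludes negative n, on which Python A raises a TypeError
-- (n**.5 is a complex number there and int() rejects it).
def Pre_check (n : Int) : Prop := 0 ≤ n
instance (n : Int) : Decidable (Pre_check n) := by unfold Pre_check; infer_instance

def pvWitness_check : Int := 12

def Spec_check (n : Int) (out : Int) : Prop := out = check_alt n
instance (n : Int) (out : Int) : Decidable (Spec_check n out) := by unfold Spec_check; infer_instance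

-- ===== CLAIM (what is proved, stated in full; the proofs are below) =====
def Claim_equal_check : Prop := ∀ (n : Int), Dom_check n → Pre_check n → Spec_check n (check n)

-- ===== LEMMAS AND PROOFS =====

-- exact digit count of Nat.toDigits: log₁₀ + 1
lemma toDigitsCore_len_log : ∀ (f m : Nat) (l : List Char), m < f →
    (Nat.toDigitsCore 10 f m l).length = Nat.log 10 m + 1 + l.length := by
  intro f
  induction f with
  | zero => intro m l h; omega
  | succ f ih =>
    intro m l h
    simp only [Nat.toDigitsCore]
    by_cases h10 : m / 10 = 0
    · have hm : m < 10 := Nat.lt_of_div_eq_zero (by norm_num) h10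
      simp [h10, Nat.log_eq_zero_iff.mpr (Or.inl hm)]
      omega
    · have hm10 : 10 ≤ m := by
        by_contra hc; exact h10 (Nat.div_eq_of_lt (by omega))
      have hlt : m / 10 < f := by
        have := Nat.div_lt_self (by omega : 0 < m) (by norm_num : 1 < 10)
        omega
      rw [if_neg h10, ih (m/10) _ hlt]
      have hlog : Nat.log 10 (m / 10) = Nat.log 10 m - 1 := Nat.log_div_base 10 m
      have hpos : 0 < Nat.log 10 m := Nat.log_pos (by norm_num) hm10
      simp only [List.length_cons]
      omega

lemma toDigits_len_log (m : Nat) : (Nat.toDigits 10 m).length = Nat.log 10 m + 1 := by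
  have := toDigitsCore_len_log (m+1) m [] (Nat.lt_succ_self m)
  simpa [Nat.toDigits] using this

lemma pyStrLen_nonneg_eq (a : Int) (ha : 0 ≤ a) :
    pyStrLen a = (Nat.log 10 a.toNat : Int) + 1 := by
  have hneg : ¬ a < 0 := by omega
  simp [pyStrLen, PySem.Str.len, PySem.Int.toList_toStr, PySem.Int.toChars, hneg,
    toDigits_len_log]

lemma pyStrLen_mono (a b : Int) (ha : 0 ≤ a) (hab : a ≤ b) :
    pyStrLen a ≤ pyStrLen b := by
  rw [pyStrLen_nonneg_eq a ha, pyStrLen_nonneg_eq b (le_trans ha hab)]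
  have : Nat.log 10 a.toNat ≤ Nat.log 10 b.toNat :=
    Nat.log_mono_right (by omega)
  omega

lemma fdivP (a b : Int) (hb : 0 ≤ b) : PySem.Int.floordiv a b = a / b := by
  simp [PySem.Int.floordiv, Int.fdiv_eq_ediv, hb]

lemma ediv_anti (a c d : Int) (ha : 0 ≤ a) (hc : 0 < c) (hcd : c ≤ d) :
    a / d ≤ a / c := by
  lift a to Nat using ha
  lift c to Nat using hc.le
  lift d to Nat using (hc.trans_le hcd).le
  rw [← Int.natCast_div, ← Int.natCast_div]
  exact_mod_cast Nat.div_le_div_left (by exact_mod_cast hcd) (by exact_mod_cast hc)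

-- for a divisor candidate i with 0 < i and i² ≤ n, the max of the two digit counts is
-- the digit count of the cofactor n // i
lemma val_eq (n i : Int) (_hn : 0 ≤ n) (hi : 0 < i) (hii : i * i ≤ n) :
    max (pyStrLen i) (pyStrLen (PySem.Int.floordiv n i)) = pyStrLen (PySem.Int.floordiv n i) := by
  have hle : i ≤ n / i := (Int.le_ediv_iff_mul_le hi).mpr hii
  rw [fdivP n i hi.le]
  exact max_eq_right (pyStrLen_mono i (n / i) hi.le hle)

lemma pyStrLen_le (a n : Int) (ha : 0 ≤ a) (han : a ≤ n) (hb : n ≤ 2147483648) :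
    pyStrLen a ≤ 1 <<< 60 := by
  rw [pyStrLen_nonneg_eq a ha]
  have h1 : Nat.log 10 a.toNat ≤ a.toNat := Nat.log_le_self 10 a.toNat
  have h2 : a.toNat ≤ 2147483648 := by omega
  have h3 : (1 : Int) <<< 60 = 1152921504606846976 := by decide
  omega

-- checkAltLoop n s is an upper bound on the value of any divisor m > s with m² ≤ n
lemma checkAltLoop_ge (n : Int) (hn : 0 ≤ n) (hbound : n ≤ 2147483648) :
    ∀ (s : Nat), (s : Int) * s ≤ n → ∀ (m : Int), (s : Int) < m → m * m ≤ n →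
      max (pyStrLen m) (pyStrLen (PySem.Int.floordiv n m)) ≤ checkAltLoop n s := by
  intro s
  induction s with
  | zero =>
    intro _ m hm hm2
    have hmpos : 0 < m := by exact_mod_cast hm
    rw [val_eq n m hn hmpos hm2, fdivP n m hmpos.le]
    have h0 : 0 ≤ n / m := Int.ediv_nonneg hn hmpos.le
    have hle : n / m ≤ n := by
      calc n / m ≤ n / 1 := ediv_anti n 1 m hn one_pos hmpos
        _ = n := Int.ediv_one n
    exact pyStrLen_le (n / m) n h0 hle hbound
  | succ s ih =>
    intro hs1 m hm hm2
    have hmpos : 0 < m := lt_of_le_of_lt (by positivity) hm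
    have hs1pos : (0:Int) < (s:Int) + 1 := by positivity
    simp only [checkAltLoop]
    by_cases hd : PySem.Int.mod n ((s:Int)+1) = 0
    · rw [if_pos hd]
      rw [val_eq n m hn hmpos hm2, val_eq n ((s:Int)+1) hn hs1pos hs1]
      rw [fdivP n m hmpos.le, fdivP n _ hs1pos.le]
      have hle : n / m ≤ n / ((s:Int)+1) := by
        apply ediv_anti n _ m hn hs1pos
        push_cast at hm ⊢; omega
      exact pyStrLen_mono _ _ (Int.ediv_nonneg hn hmpos.le) hle
    · rw [if_neg hd]
      apply ih
      · push_cast at hs1 ⊢; nlinarith [hs1]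
      · push_cast at hm ⊢; omega
      · exact hm2

lemma pyRange_self (a : Int) : PySem.List.pyRange a a 1 = [] := by
  simp [PySem.List.pyRange]

lemma pyRange_singleton (a : Int) : PySem.List.pyRange a (a+1) 1 = [a] := by
  rw [PySem.List.pyRange_one_cons (by omega : a < a + 1), pyRange_self]

-- the forward accumulate-min over [1, s] equals the backward early-return scan from s
lemma fold_eq_loop (n : Int) (hn : 0 ≤ n) (hbound : n ≤ 2147483648) :
    ∀ (s : Nat), (s : Int) * s ≤ n →
      (PySem.List.pyRange 1 ((s : Int) + 1) 1).foldl
        (fun min_len i =>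
          if PySem.Int.mod n i = 0 then
            min min_len (max (pyStrLen i) (pyStrLen (PySem.Int.floordiv n i)))
          else min_len)
        (1 <<< 60) = checkAltLoop n s := by
  intro s
  induction s with
  | zero =>
    intro _
    have h1 : ((0:Nat):Int)+1 = 1 := by norm_num
    rw [h1, pyRange_self]
    rfl
  | succ s ih =>
    intro hs1
    have hsplit : PySem.List.pyRange 1 ((↑(s+1) : Int) + 1) 1
        = PySem.List.pyRange 1 ((s:Int) + 1) 1 ++ PySem.List.pyRange ((s:Int)+1) ((s:Int)+1+1) 1 := by
      have := PySem.List.pyRange_one_append 1 ((s:Int)+1) ((s:Int)+1+1) (by omega) (by omega)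
      push_cast
      exact this
    rw [hsplit, List.foldl_append, ih (by push_cast at hs1 ⊢; nlinarith), pyRange_singleton]
    simp only [List.foldl_cons, List.foldl_nil]
    by_cases hd : PySem.Int.mod n ((s:Int)+1) = 0
    · rw [if_pos hd]
      have hge := checkAltLoop_ge n hn hbound s (by push_cast at hs1 ⊢; nlinarith)
        ((s:Int)+1) (by omega) (by push_cast at hs1 ⊢; linarith)
      have h2 : checkAltLoop n (s+1) = max (pyStrLen ((s:Int)+1)) (pyStrLen (PySem.Int.floordiv n ((s:Int)+1))) := by
        simp only [checkAltLoop]; rw [if_pos hd]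
      rw [h2, min_eq_right hge]
    · rw [if_neg hd]
      simp only [checkAltLoop]; rw [if_neg hd]

-- ===== VERDICT (by name: the statement is the Claim_ definition above) =====
theorem check_spec : Claim_equal_check := by
  intro n hdom hpre
  have hn : 0 ≤ n := hpre
  have hb : n ≤ 2147483648 := by
    simp only [Dom_check, pvDomInt, decide_eq_true_eq] at hdom
    exact hdom.2
  have hs : ((Nat.sqrt n.toNat : Int)) * (Nat.sqrt n.toNat : Int) ≤ n := by
    have h1 : Nat.sqrt n.toNat * Nat.sqrt n.toNat ≤ n.toNat := Nat.sqrt_le n.toNat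
    have h2 : (n.toNat : Int) = n := Int.toNat_of_nonneg hn
    rw [← h2]
    exact_mod_cast h1
  show check n = check_alt n
  exact fold_eq_loop n hn hb (Nat.sqrt n.toNat) hs
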